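-- pv_equiv track=rewrite | github.com/a8966321/Python | NBA(預測)_3.py | get_day_data
-- ===== SOURCE A (Python) =====
-- def get_day_data(numbers):
--     count=0
--     win_count=0
--     while count<len(numbers):
--         #奇數
--         if numbers[count]%2!=0:
--             win_count+=1
--             #假如已經兩勝!
--             if win_count==2:
--                 break
--         else:
--             win_count-=1
--             #輸一或歸零就離開
--             if win_count<=0:
--                 break
--         count+=1
--
--     return win_count
-- ===== SOURCE B (Python) =====
-- def get_day_data(numbers):
--     # Closed form: the loop's outcome is determined by the first one or two elements.
--     if not numbers:
--         return 0
--     if numbers[0] % 2 == 0: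
--         return -1
--     if len(numbers) == 1:
--         return 1
--     return 2 if numbers[1] % 2 != 0 else 0
-- ===== Notes on version B (the rewrite author's own statement) =====
-- stated objective: simpler
-- what changed: Replaced the while-loop with a loop counter by a closed-form case table over the first two elements, since the loop always breaks within two iterations.
import Mathlib
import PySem

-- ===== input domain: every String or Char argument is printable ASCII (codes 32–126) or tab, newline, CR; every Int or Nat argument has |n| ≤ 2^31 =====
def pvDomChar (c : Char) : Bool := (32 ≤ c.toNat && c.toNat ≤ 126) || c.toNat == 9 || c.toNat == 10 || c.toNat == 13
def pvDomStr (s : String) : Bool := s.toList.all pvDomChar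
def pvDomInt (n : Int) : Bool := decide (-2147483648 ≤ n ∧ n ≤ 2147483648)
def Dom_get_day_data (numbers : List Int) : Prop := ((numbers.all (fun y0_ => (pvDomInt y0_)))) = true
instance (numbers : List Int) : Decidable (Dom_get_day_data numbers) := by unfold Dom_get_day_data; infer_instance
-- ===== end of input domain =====

-- B replaces A's while-loop by a closed-form case table on the first two elements (simpler).


-- ===== PORT A =====
-- while-loop of A: index `count`, accumulator `win_count`; decreasing on numbers.length - count
def get_day_data_loop (numbers : List Int) (count : Nat) (win_count : Int) : Int :=
  if _h : count < numbers.length then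
    if (PySem.List.pyGet? numbers (Int.ofNat count)).getD 0 % 2 ≠ 0 then
      if win_count + 1 = 2 then win_count + 1
      else get_day_data_loop numbers (count + 1) (win_count + 1)
    else
      if win_count - 1 ≤ 0 then win_count - 1
      else get_day_data_loop numbers (count + 1) (win_count - 1)
  else win_count
termination_by numbers.length - count

def get_day_data (numbers : List Int) : Int :=
  get_day_data_loop numbers 0 0

-- ===== PORT B =====
def get_day_data_alt (numbers : List Int) : Int :=
  match numbers with
  | [] => 0
  | n0 :: rest =>
    if n0 % 2 = 0 then -1
    else match rest with
      | [] => 1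
      | n1 :: _ => if n1 % 2 ≠ 0 then 2 else 0

-- ===== PRECONDITION & SPEC =====
def Spec_get_day_data (numbers : List Int) (out : Int) : Prop := out = get_day_data_alt numbers
instance (numbers : List Int) (out : Int) : Decidable (Spec_get_day_data numbers out) := by unfold Spec_get_day_data; infer_instance

-- ===== CLAIM (what is proved, stated in full; the proofs are below) =====
def Claim_equal_get_day_data : Prop := ∀ (numbers : List Int), Dom_get_day_data numbers → Spec_get_day_data numbers (get_day_data numbers)

-- ===== LEMMAS AND PROOFS =====

lemma pv_cast_succ_nonneg (n : Nat) : (0:Int) ≤ (n:Int) + 1 := by positivity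

-- ===== VERDICT (by name: the statement is the Claim_ definition above) =====
theorem get_day_data_spec : Claim_equal_get_day_data := by
  intro numbers _
  unfold Spec_get_day_data
  match numbers with
  | [] => simp [get_day_data, get_day_data_loop, get_day_data_alt]
  | [n0] =>
    simp only [get_day_data, get_day_data_alt]
    unfold get_day_data_loop
    rcases Int.emod_two_eq_zero_or_one n0 with h | h <;>
      simp [PySem.List.pyGet?, PySem.List.pyIdx?, Option.bind, Option.getD, h, get_day_data_loop]
  | n0 :: n1 :: rest =>
    simp only [get_day_data, get_day_data_alt]
    unfold get_day_data_loop
    rcases Int.emod_two_eq_zero_or_one n0 with h0 | h0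
    · simp [PySem.List.pyGet?, PySem.List.pyIdx?, Option.bind, Option.getD, pv_cast_succ_nonneg, h0]
    · unfold get_day_data_loop
      rcases Int.emod_two_eq_zero_or_one n1 with h1 | h1 <;>
        simp [PySem.List.pyGet?, PySem.List.pyIdx?, Option.bind, Option.getD, pv_cast_succ_nonneg, h0, h1]
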